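-- pv_equiv track=rewrite | github.com/tsuru7/algorithm-study | AtCoder/ABC/201-300/ABC237/D.py | solve
-- ===== SOURCE A (Python) =====
-- def solve(n,s):
--     head = Node()
--     tail = Node()
--     zero = Node(0)
--     head.right = zero
--     tail.left = zero
--     zero.left = head
--     zero.right = tail
--     now = zero
--     for i in range(n):
--         c = s[i]
--         newnode = Node(i+1)
--         if c == 'L':
--             leftnode = now.left
--             leftnode.right = newnode
--             newnode.left = leftnode
--             newnode.right = now
--             now.left = newnode
--         else:
--             rightnode = now.right
--             rightnode.left = newnode
--             newnode.right = rightnode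
--             newnode.left = now
--             now.right = newnode
--         now = newnode
--     ans = []
--     now = head
--     while now.right != None:
--         now = now.right
--         ans.append(now.data)
--
--
--     return ans[:-1]
--
-- class Node:
--     def __init__(self, data=-1):
--         self.data = data
--         self.left = None
--         self.right = None
-- ===== SOURCE B (Python) =====
-- def solve(n, s):
--     # Two stacks around the cursor: elements left of the current one (in order)
--     # and elements right of it (nearest first).  'L' pushes the old current to
--     # the right stack, 'R' pushes it to the left list; no linked nodes, no
--     # final traversal.
--     left = []
--     right = []
--     cur = 0
--     for i in range(n):
--         if s[i] == 'L':
--             right.append(cur)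
--         else:
--             left.append(cur)
--         cur = i + 1
--     return left + [cur] + right[::-1]
-- ===== Notes on version B (the rewrite author's own statement) =====
-- stated objective: simpler
-- what changed: Replaces the hand-rolled doubly linked list (Node class with left/right pointer surgery plus a final head-to-tail traversal) by two plain stacks around the cursor: 'L' pushes the current value onto the right stack, 'R' onto the left list, and the answer is left + [cur] + reversed(right) with no node objects and no traversal pass.
import Mathlib
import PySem

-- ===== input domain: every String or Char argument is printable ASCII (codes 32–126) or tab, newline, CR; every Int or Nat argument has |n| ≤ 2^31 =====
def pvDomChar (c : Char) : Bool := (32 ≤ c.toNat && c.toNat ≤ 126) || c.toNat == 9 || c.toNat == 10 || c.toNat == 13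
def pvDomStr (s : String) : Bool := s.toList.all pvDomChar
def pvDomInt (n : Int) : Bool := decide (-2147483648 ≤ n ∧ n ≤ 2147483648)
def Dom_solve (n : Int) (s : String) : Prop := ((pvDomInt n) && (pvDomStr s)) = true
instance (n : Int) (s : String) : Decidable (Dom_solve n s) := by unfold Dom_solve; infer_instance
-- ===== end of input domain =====

-- B replaces A's hand-rolled doubly linked list (pointer surgery + final traversal) by two
-- plain stacks around the cursor; return values only (A mutates nothing observable).

-- ===== PORT A =====
-- A's Node heap is modelled by pointer FUNCTIONS on integer node ids (one fresh id per
-- allocation: head = -2, tail = -1, zero = 0, the node holding i+1 has id i+1); each Python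
-- attribute assignment is one pointwise function update, in A's order.
abbrev solveAState : Type := (Int → Option Int) × (Int → Option Int) × (Int → Int) × Int

-- the while-loop 'now = now.right; ans.append(now.data)' (fuel bounds the walk; any
-- sufficient fuel gives the loop's value)
def solveTrav (R : Int → Option Int) (D : Int → Int) : Nat → Int → List Int
  | 0, _ => []
  | fuel+1, now =>
    match R now with
    | none => []
    | some nxt => D nxt :: solveTrav R D fuel nxt

def solveStep (s : String) (st : solveAState) (i : Int) : solveAState :=
  match st with
  | (L, R, D, now) =>
    -- c = s[i]  (none = IndexError, excluded by Pre_solve); newnode = Node(i+1) has fresh id i+1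
    -- and its data update is the 'if x = i+1 then i+1 else D x' layer
    if (PySem.Str.pyGet? s i).getD ' ' = 'L' then
      match L now with                           -- leftnode = now.left (never None in Python)
      | none => (L, R, fun x => if x = i+1 then i+1 else D x, now)
      | some ln =>
        -- leftnode.right = new; newnode.left = leftnode; newnode.right = now; now.left = new
        (fun x => if x = now then some (i+1) else if x = i+1 then some ln else L x,
         fun x => if x = i+1 then some now else if x = ln then some (i+1) else R x,
         fun x => if x = i+1 then i+1 else D x,
         i+1)
    else
      match R now with                           -- rightnode = now.right (never None in Python)
      | none => (L, R, fun x => if x = i+1 then i+1 else D x, now)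
      | some rn =>
        -- rightnode.left = new; newnode.right = rightnode; newnode.left = now; now.right = new
        (fun x => if x = i+1 then some now else if x = rn then some (i+1) else L x,
         fun x => if x = now then some (i+1) else if x = i+1 then some rn else R x,
         fun x => if x = i+1 then i+1 else D x,
         i+1)

def solve (n : Int) (s : String) : List Int :=
  -- prologue: head/tail/zero linked head ↔ zero ↔ tail
  let L0 : Int → Option Int := fun x => if x = 0 then some (-2) else if x = -1 then some 0 else none
  let R0 : Int → Option Int := fun x => if x = -2 then some 0 else if x = 0 then some (-1) else none
  let D0 : Int → Int := fun x => if x = 0 then 0 else -1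
  let st := (PySem.List.pyRange 0 n 1).foldl (solveStep s) (L0, R0, D0, 0)
  let ans := solveTrav st.2.1 st.2.2.1 (n.toNat + 4) (-2)
  PySem.List.slice ans none (some (-1))         -- ans[:-1]

-- ===== PORT B =====
def solve_alt (n : Int) (s : String) : List Int :=
  let st := (PySem.List.pyRange 0 n 1).foldl
    (fun (st : List Int × Int × List Int) (i : Int) =>
      let left := st.1; let cur := st.2.1; let right := st.2.2
      if (PySem.Str.pyGet? s i).getD ' ' = 'L' then (left, i + 1, right ++ [cur])
      else (left ++ [cur], i + 1, right))
    ([], 0, [])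
  st.1 ++ [st.2.1] ++ st.2.2.reverse

-- ===== PRECONDITION & SPEC =====
-- Pre_ excludes exactly the inputs where s[i] raises IndexError in A (and in B): n > len(s).
def Pre_solve (n : Int) (s : String) : Prop := n ≤ (PySem.Str.len s)
instance (n : Int) (s : String) : Decidable (Pre_solve n s) := by unfold Pre_solve; infer_instance
def pvWitness_solve : Int × String := (4, "LRLR")

def Spec_solve (n : Int) (s : String) (out : List Int) : Prop := out = solve_alt n s
instance (n : Int) (s : String) (out : List Int) : Decidable (Spec_solve n s out) := by unfold Spec_solve; infer_instance

-- ===== CLAIM (what is proved, stated in full; the proofs are below) =====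
def Claim_equal_solve : Prop := ∀ (n : Int) (s : String), Dom_solve n s → Pre_solve n s → Spec_solve n s (solve n s)

-- ===== LEMMAS AND PROOFS =====

-- successor-in-chain function: pvNxt c a = the element following the (first) a in c
def pvNxt : List Int → Int → Option Int
  | [], _ => none
  | [_], _ => none
  | x :: y :: r, a => if x = a then some y else pvNxt (y :: r) a

theorem pvNxt_cons (x : Int) (l : List Int) (a : Int) :
    pvNxt (x :: l) a = if x = a then l.head? else pvNxt l a := by
  cases l <;> simp [pvNxt]

theorem pvNxt_append_not_mem (p l : List Int) (a : Int) (h : a ∉ p) :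
    pvNxt (p ++ l) a = pvNxt l a := by
  induction p with
  | nil => rfl
  | cons x p ih =>
    simp only [List.mem_cons, not_or] at h
    rw [List.cons_append, pvNxt_cons, if_neg (fun hx => h.1 hx.symm)]
    exact ih h.2

theorem pvNxt_middle (p q : List Int) (a : Int) (h : a ∉ p) :
    pvNxt (p ++ a :: q) a = q.head? := by
  rw [pvNxt_append_not_mem p _ a h, pvNxt_cons, if_pos rfl]

-- scans that differ only past p with the same head agree pointwise where tails agree
theorem pvNxt_append_congr (p : List Int) {l l' : List Int} (x : Int)
    (hh : l.head? = l'.head?) (hx : pvNxt l x = pvNxt l' x) :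
    pvNxt (p ++ l) x = pvNxt (p ++ l') x := by
  induction p with
  | nil => exact hx
  | cons y p ih =>
    rw [List.cons_append, List.cons_append, pvNxt_cons, pvNxt_cons]
    have hph : (p ++ l).head? = (p ++ l').head? := by
      cases p with
      | nil => simpa using hh
      | cons z p => simp
    rw [hph]
    exact if_congr Iff.rfl rfl ih

-- THE insertion lemma: inserting fresh b after a rewires exactly two successors
theorem nodup_middle_not_mem {p q : List Int} {a : Int} (h : (p ++ a :: q).Nodup) : a ∉ p :=
  fun hm => (List.disjoint_of_nodup_append h) hm (List.mem_cons_self ..)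

theorem pvNxt_insert (p q : List Int) (a b x : Int)
    (ha : a ∉ p) (hb : b ∉ p) (hab : a ≠ b) (hbq : b ∉ q) :
    pvNxt (p ++ a :: b :: q) x =
      if x = b then q.head? else if x = a then some b else pvNxt (p ++ a :: q) x := by
  by_cases hxb : x = b
  · subst hxb
    rw [if_pos rfl, pvNxt_append_not_mem p _ x hb, pvNxt_cons, if_neg hab,
        pvNxt_cons, if_pos rfl]
  · rw [if_neg hxb]
    by_cases hxa : x = a
    · subst hxa
      rw [if_pos rfl, pvNxt_append_not_mem p _ x ha, pvNxt_cons, if_pos rfl]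
      rfl
    · rw [if_neg hxa]
      refine pvNxt_append_congr p x (by simp) ?_
      rw [pvNxt_cons, if_neg (fun h : a = x => hxa h.symm),
          pvNxt_cons, if_neg (fun h : b = x => hxb h.symm),
          pvNxt_cons, if_neg (fun h : a = x => hxa h.symm)]

-- the loop invariant tying A's heap to B's stacks after processing indices 0..j-1:
-- the pointers are exactly the successor/predecessor functions of the chain
-- -2(head) :: left ++ cur :: right.reverse ++ [-1](tail)
def solveInv (j : Int) (stA : solveAState) (stB : List Int × Int × List Int) : Prop :=
  (stB.1 ++ stB.2.1 :: stB.2.2.reverse).Nodup ∧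
  (∀ x ∈ stB.1 ++ stB.2.1 :: stB.2.2.reverse, 0 ≤ x ∧ x ≤ j) ∧
  stA.2.2.2 = stB.2.1 ∧
  stA.1 = (fun x => pvNxt (((-2) :: (stB.1 ++ stB.2.1 :: stB.2.2.reverse) ++ [-1]).reverse) x) ∧
  stA.2.1 = (fun x => pvNxt ((-2) :: (stB.1 ++ stB.2.1 :: stB.2.2.reverse) ++ [-1]) x) ∧
  stA.2.2.1 = (fun x => if 0 ≤ x ∧ x ≤ j then x else -1)

theorem solveInv_init :
    solveInv 0
      ((fun x => if x = 0 then some (-2) else if x = -1 then some 0 else none),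
       (fun x => if x = -2 then some 0 else if x = 0 then some (-1) else none),
       (fun x => if x = 0 then 0 else -1), 0)
      ([], 0, []) := by
  refine ⟨by simp, by simp, rfl, ?_, ?_, ?_⟩ <;> funext x
  · show (if x = 0 then some (-2) else if x = -1 then some 0 else none) = pvNxt [-1, 0, -2] x
    rw [pvNxt_cons, pvNxt_cons]
    simp only [List.head?_cons, pvNxt]
    split_ifs <;> first | rfl | omega
  · show (if x = -2 then some 0 else if x = 0 then some (-1) else none) = pvNxt [-2, 0, -1] x
    rw [pvNxt_cons, pvNxt_cons]
    simp only [List.head?_cons, pvNxt]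
    split_ifs <;> first | rfl | omega
  · show (if x = 0 then (0:Int) else -1) = if 0 ≤ x ∧ x ≤ 0 then x else -1
    split_ifs <;> omega

theorem solveInv_step (s : String) (j : Int) (c : Char)
    (stA : solveAState) (stB : List Int × Int × List Int)
    (hInv : solveInv j stA stB) (hj : 0 ≤ j)
    (hc : PySem.Str.pyGet? s j = some c) :
    solveInv (j + 1) (solveStep s stA j)
      (if c = 'L' then (stB.1, j + 1, stB.2.2 ++ [stB.2.1])
       else (stB.1 ++ [stB.2.1], j + 1, stB.2.2)) := by
  obtain ⟨L, R, D, now⟩ := stA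
  obtain ⟨lf, cur, rt⟩ := stB
  obtain ⟨hnd, hbd, hnow, hL, hR, hD⟩ := hInv
  simp only at hnd hbd hnow hL hR hD
  subst hnow
  have hLx : ∀ y, L y = pvNxt (((-2 : Int) :: (lf ++ now :: rt.reverse) ++ [-1]).reverse) y :=
    fun y => by rw [hL]
  have hRx : ∀ y, R y = pvNxt ((-2 : Int) :: (lf ++ now :: rt.reverse) ++ [-1]) y :=
    fun y => by rw [hR]
  -- basic membership facts
  have hmid0 := List.nodup_cons.mp (List.nodup_middle.mp hnd)
  have hmid := hmid0.2
  have hcurlf : now ∉ lf := fun h => hmid0.1 (List.mem_append.mpr (Or.inl h))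
  have hcurrt : now ∉ rt := fun h =>
    hmid0.1 (List.mem_append.mpr (Or.inr (List.mem_reverse.mpr h)))
  have hblf : ∀ x ∈ lf, 0 ≤ x ∧ x ≤ j := fun x hx => hbd x (List.mem_append.mpr (Or.inl hx))
  have hbrt : ∀ x ∈ rt, 0 ≤ x ∧ x ≤ j := fun x hx =>
    hbd x (List.mem_append.mpr (Or.inr (List.mem_cons_of_mem _ (List.mem_reverse.mpr hx))))
  have hbcur : 0 ≤ now ∧ now ≤ j := hbd now (List.mem_append.mpr (Or.inr (List.mem_cons_self ..)))
  have hvlf : j + 1 ∉ lf := fun h => by have := hblf _ h; omega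
  have hvrt : j + 1 ∉ rt := fun h => by have := hbrt _ h; omega
  have hvcur : j + 1 ≠ now := fun h => by omega
  have hn2lf : (-2 : Int) ∉ lf := fun h => by have := hblf _ h; omega
  have hn1rt : (-1 : Int) ∉ rt := fun h => by have := hbrt _ h; omega
  have hlfnd : lf.Nodup := hmid.of_append_left
  have hrtnd : rt.Nodup := List.nodup_reverse.mp hmid.of_append_right
  by_cases hcL : c = 'L'
  · subst hcL
    rw [if_pos rfl]
    -- decompose the part left of the cursor:  (-2 :: lf).reverse  is  ln :: tl
    obtain ⟨ln, tl, hlf⟩ : ∃ ln tl, lf.reverse ++ [(-2 : Int)] = ln :: tl := by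
      cases h : lf.reverse ++ [(-2 : Int)] with
      | nil => simp at h
      | cons a b => exact ⟨a, b, rfl⟩
    have hlf2 : (-2 : Int) :: lf = tl.reverse ++ [ln] := by
      have := congrArg List.reverse hlf
      simpa using this
    have hlnt_nd : (ln :: tl).Nodup := by
      rw [← hlf]
      refine List.Nodup.append (List.nodup_reverse.mpr hlfnd) (List.nodup_singleton _) ?_
      intro a ha hb
      simp only [List.mem_singleton] at hb
      subst hb
      exact hn2lf (List.mem_reverse.mp ha)
    have hmemlnt : ∀ x ∈ ln :: tl, x ∈ lf ∨ x = -2 := by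
      intro x hx
      rw [← hlf] at hx
      rcases List.mem_append.mp hx with h | h
      · exact Or.inl (List.mem_reverse.mp h)
      · simp only [List.mem_singleton] at h
        exact Or.inr h
    have hvlnt : j + 1 ∉ ln :: tl := by
      intro h
      rcases hmemlnt _ h with h | h
      · exact hvlf h
      · omega
    have hlnv : ln ≠ j + 1 := fun h => hvlnt (h ▸ List.mem_cons_self ..)
    -- old and new chains, reversed chains
    have e2 : ((-2 : Int) :: (lf ++ now :: rt.reverse) ++ [-1]).reverse
        = ((-1) :: rt) ++ now :: (ln :: tl) := by
      rw [← hlf]; simp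
    have e2' : ((-2 : Int) :: (lf ++ now :: rt.reverse) ++ [-1])
        = tl.reverse ++ ln :: (now :: (rt.reverse ++ [-1])) := by
      have h0 : ((-2 : Int) :: (lf ++ now :: rt.reverse) ++ [-1])
          = ((-2 : Int) :: lf) ++ now :: (rt.reverse ++ [-1]) := by simp
      rw [h0, hlf2]; simp
    have e1 : ((-2 : Int) :: (lf ++ (j+1) :: (rt ++ [now]).reverse) ++ [-1]).reverse
        = ((-1) :: rt) ++ now :: ((j+1) :: (ln :: tl)) := by
      rw [← hlf]; simp
    have e1' : ((-2 : Int) :: (lf ++ (j+1) :: (rt ++ [now]).reverse) ++ [-1])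
        = tl.reverse ++ ln :: ((j+1) :: (now :: (rt.reverse ++ [-1]))) := by
      have h0 : ((-2 : Int) :: (lf ++ (j+1) :: (rt ++ [now]).reverse) ++ [-1])
          = ((-2 : Int) :: lf) ++ (j+1) :: (now :: (rt.reverse ++ [-1])) := by simp
      rw [h0, hlf2]; simp
    have hcur_p : now ∉ (-1 : Int) :: rt := by
      intro h
      rcases List.mem_cons.mp h with h | h
      · omega
      · exact hcurrt h
    have hv_p : (j+1 : Int) ∉ (-1 : Int) :: rt := by
      intro h
      rcases List.mem_cons.mp h with h | h
      · omega
      · exact hvrt h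
    -- now.left = some ln
    have hLcur : L now = some ln := by
      rw [hLx now, e2, pvNxt_middle _ _ _ hcur_p]
      rfl
    have hstepA : solveStep s (L, R, D, now) j
        = (fun x => if x = now then some (j+1) else if x = j+1 then some ln else L x,
           fun x => if x = j+1 then some now else if x = ln then some (j+1) else R x,
           fun x => if x = j+1 then j+1 else D x,
           j+1) := by
      simp only [solveStep, hc, Option.getD_some]
      rw [if_pos trivial, hLcur]
    show solveInv (j+1) (solveStep s (L, R, D, now) j) (lf, j+1, rt ++ [now])
    rw [hstepA]
    refine ⟨?_, ?_, rfl, ?_, ?_, ?_⟩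
    · -- Nodup of the new sequence
      dsimp only
      have hrw : (rt ++ [now]).reverse = now :: rt.reverse := by simp
      rw [hrw, List.nodup_middle, List.nodup_cons]
      refine ⟨?_, hnd⟩
      intro h
      rcases List.mem_append.mp h with h | h
      · exact hvlf h
      · rcases List.mem_cons.mp h with h | h
        · exact hvcur h
        · exact hvrt (List.mem_reverse.mp h)
    · -- bounds
      dsimp only
      intro x hx
      rcases List.mem_append.mp hx with h | h
      · have := hblf _ h; omega
      · rcases List.mem_cons.mp h with h | h
        · omega
        · have h' := List.mem_reverse.mp h
          rcases List.mem_append.mp (by simpa using h' : x ∈ rt ++ [now]) with h'' | h''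
          · have := hbrt _ h''; omega
          · simp only [List.mem_singleton] at h''; omega
    · -- new left pointers
      funext x
      dsimp only
      rw [e1, pvNxt_insert ((-1) :: rt) (ln :: tl) now (j+1) x hcur_p hv_p
            (fun h => hvcur h.symm) hvlnt, ← e2, ← hLx x]
      simp only [List.head?_cons]
      by_cases h1 : x = now
      · subst h1
        rw [if_pos rfl, if_neg (fun h => hvcur h.symm), if_pos rfl]
      · rw [if_neg h1]
        by_cases h2 : x = j + 1
        · subst h2; rw [if_pos rfl, if_pos rfl]
        · rw [if_neg h2, if_neg h2, if_neg h1]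
    · -- new right pointers
      funext x
      dsimp only
      rw [e1', pvNxt_insert tl.reverse (now :: (rt.reverse ++ [-1])) ln (j+1) x
            (fun h => (List.nodup_cons.mp hlnt_nd).1 (List.mem_reverse.mp h))
            (fun h => hvlnt (List.mem_cons_of_mem _ (List.mem_reverse.mp h)))
            hlnv
            (by intro h
                rcases List.mem_cons.mp h with h | h
                · exact hvcur h
                · rcases List.mem_append.mp h with h | h
                  · exact hvrt (List.mem_reverse.mp h)
                  · simp only [List.mem_singleton] at h; omega),
          ← e2', ← hRx x]
      simp only [List.head?_cons]
    · -- new data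
      funext x
      dsimp only
      rw [hD]
      by_cases h1 : x = j + 1
      · subst h1; rw [if_pos rfl, if_pos (by omega)]
      · rw [if_neg h1]
        show (if 0 ≤ x ∧ x ≤ j then x else -1) = if 0 ≤ x ∧ x ≤ j + 1 then x else -1
        by_cases h2 : 0 ≤ x ∧ x ≤ j
        · rw [if_pos h2, if_pos (by omega)]
        · rw [if_neg h2, if_neg (by omega)]
  · rw [if_neg hcL]
    -- decompose the part right of the cursor:  rt.reverse ++ [-1]  is  rn :: t2
    obtain ⟨rn, t2, hq0⟩ : ∃ rn t2, rt.reverse ++ [(-1 : Int)] = rn :: t2 := by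
      cases h : rt.reverse ++ [(-1 : Int)] with
      | nil => simp at h
      | cons a b => exact ⟨a, b, rfl⟩
    have hq0rev : (-1 : Int) :: rt = t2.reverse ++ [rn] := by
      have := congrArg List.reverse hq0
      simpa using this
    have hq0nd : (rn :: t2).Nodup := by
      rw [← hq0]
      refine List.Nodup.append (List.nodup_reverse.mpr hrtnd) (List.nodup_singleton _) ?_
      intro a ha hb
      simp only [List.mem_singleton] at hb
      subst hb
      exact hn1rt (List.mem_reverse.mp ha)
    have hmemq0 : ∀ x ∈ rn :: t2, x ∈ rt ∨ x = -1 := by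
      intro x hx
      rw [← hq0] at hx
      rcases List.mem_append.mp hx with h | h
      · exact Or.inl (List.mem_reverse.mp h)
      · simp only [List.mem_singleton] at h
        exact Or.inr h
    have hvq0 : j + 1 ∉ rn :: t2 := by
      intro h
      rcases hmemq0 _ h with h | h
      · exact hvrt h
      · omega
    have hrnv : rn ≠ j + 1 := fun h => hvq0 (h ▸ List.mem_cons_self ..)
    -- old and new chains, reversed chains
    have e2 : ((-2 : Int) :: (lf ++ now :: rt.reverse) ++ [-1])
        = ((-2) :: lf) ++ now :: (rn :: t2) := by
      rw [← hq0]; simp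
    have e2' : ((-2 : Int) :: (lf ++ now :: rt.reverse) ++ [-1]).reverse
        = t2.reverse ++ rn :: (now :: (lf.reverse ++ [-2])) := by
      have h0 : ((-2 : Int) :: (lf ++ now :: rt.reverse) ++ [-1]).reverse
          = ((-1) :: rt) ++ now :: (lf.reverse ++ [-2]) := by simp
      rw [h0, hq0rev]; simp
    have e1 : ((-2 : Int) :: ((lf ++ [now]) ++ (j+1) :: rt.reverse) ++ [-1])
        = ((-2) :: lf) ++ now :: ((j+1) :: (rn :: t2)) := by
      rw [← hq0]; simp
    have e1' : ((-2 : Int) :: ((lf ++ [now]) ++ (j+1) :: rt.reverse) ++ [-1]).reverse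
        = t2.reverse ++ rn :: ((j+1) :: (now :: (lf.reverse ++ [-2]))) := by
      have h0 : ((-2 : Int) :: ((lf ++ [now]) ++ (j+1) :: rt.reverse) ++ [-1]).reverse
          = ((-1) :: rt) ++ (j+1) :: (now :: (lf.reverse ++ [-2])) := by simp
      rw [h0, hq0rev]; simp
    have hcur_p : now ∉ (-2 : Int) :: lf := by
      intro h
      rcases List.mem_cons.mp h with h | h
      · omega
      · exact hcurlf h
    have hv_p : (j+1 : Int) ∉ (-2 : Int) :: lf := by
      intro h
      rcases List.mem_cons.mp h with h | h
      · omega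
      · exact hvlf h
    have hvw : (j+1 : Int) ∉ now :: (lf.reverse ++ [-2]) := by
      intro h
      rcases List.mem_cons.mp h with h | h
      · exact hvcur h
      · rcases List.mem_append.mp h with h | h
        · exact hvlf (List.mem_reverse.mp h)
        · simp only [List.mem_singleton] at h; omega
    -- now.right = some rn
    have hRcur : R now = some rn := by
      rw [hRx now, e2, pvNxt_middle _ _ _ hcur_p]
      rfl
    have hstepA : solveStep s (L, R, D, now) j
        = (fun x => if x = j+1 then some now else if x = rn then some (j+1) else L x,
           fun x => if x = now then some (j+1) else if x = j+1 then some rn else R x,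
           fun x => if x = j+1 then j+1 else D x,
           j+1) := by
      simp only [solveStep, hc, Option.getD_some]
      rw [if_neg hcL, hRcur]
    show solveInv (j+1) (solveStep s (L, R, D, now) j) (lf ++ [now], j+1, rt)
    rw [hstepA]
    refine ⟨?_, ?_, rfl, ?_, ?_, ?_⟩
    · -- Nodup of the new sequence
      dsimp only
      rw [List.nodup_middle, List.nodup_cons]
      constructor
      · intro h
        rcases List.mem_append.mp h with h | h
        · rcases List.mem_append.mp h with h | h
          · exact hvlf h
          · simp only [List.mem_singleton] at h; exact hvcur h
        · exact hvrt (List.mem_reverse.mp h)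
      · have h0 : (lf ++ [now]) ++ rt.reverse = lf ++ now :: rt.reverse := by simp
        rw [h0]
        exact hnd
    · -- bounds
      dsimp only
      intro x hx
      rcases List.mem_append.mp hx with h | h
      · rcases List.mem_append.mp h with h | h
        · have := hblf _ h; omega
        · simp only [List.mem_singleton] at h; omega
      · rcases List.mem_cons.mp h with h | h
        · omega
        · have := hbrt _ (List.mem_reverse.mp h); omega
    · -- new left pointers
      funext x
      dsimp only
      rw [e1', pvNxt_insert t2.reverse (now :: (lf.reverse ++ [-2])) rn (j+1) x
            (fun h => (List.nodup_cons.mp hq0nd).1 (List.mem_reverse.mp h))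
            (fun h => hvq0 (List.mem_cons_of_mem _ (List.mem_reverse.mp h)))
            hrnv hvw,
          ← e2', ← hLx x]
      simp only [List.head?_cons]
    · -- new right pointers
      funext x
      dsimp only
      rw [e1, pvNxt_insert ((-2) :: lf) (rn :: t2) now (j+1) x hcur_p hv_p
            (fun h => hvcur h.symm) hvq0, ← e2, ← hRx x]
      simp only [List.head?_cons]
      by_cases h1 : x = now
      · subst h1
        rw [if_pos rfl, if_neg (fun h => hvcur h.symm), if_pos rfl]
      · rw [if_neg h1]
        by_cases h2 : x = j + 1
        · subst h2; rw [if_pos rfl, if_pos rfl]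
        · rw [if_neg h2, if_neg h2, if_neg h1]
    · -- new data
      funext x
      dsimp only
      rw [hD]
      by_cases h1 : x = j + 1
      · subst h1; rw [if_pos rfl, if_pos (by omega)]
      · rw [if_neg h1]
        show (if 0 ≤ x ∧ x ≤ j then x else -1) = if 0 ≤ x ∧ x ≤ j + 1 then x else -1
        by_cases h2 : 0 ≤ x ∧ x ≤ j
        · rw [if_pos h2, if_pos (by omega)]
        · rw [if_neg h2, if_neg (by omega)]

theorem solveTrav_chain (D : Int → Int) (q : List Int) :
    ∀ (p : List Int) (a : Int) (fuel : Nat), (p ++ a :: q).Nodup → q.length < fuel →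
      solveTrav (fun x => pvNxt (p ++ a :: q) x) D fuel a = q.map D := by
  induction q with
  | nil =>
    intro p a fuel hnd hf
    cases fuel with
    | zero => omega
    | succ f =>
      simp only [solveTrav]
      rw [pvNxt_middle p [] a (nodup_middle_not_mem hnd)]
      rfl
  | cons b q ih =>
    intro p a fuel hnd hf
    cases fuel with
    | zero => omega
    | succ f =>
      simp only [solveTrav]
      rw [pvNxt_middle p (b :: q) a (nodup_middle_not_mem hnd)]
      simp only [List.head?_cons, List.map_cons]
      have hre : p ++ a :: b :: q = (p ++ [a]) ++ b :: q := by simp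
      rw [hre] at hnd
      simp only [hre]
      exact congrArg (D b :: ·) (ih (p ++ [a]) b f hnd (by
        simp only [List.length_cons] at hf; omega))

-- the fold over any tail of the range preserves the invariant
theorem solveInv_fold (n : Int) (s : String) (hs : n ≤ (PySem.Str.len s)) :
    ∀ (k : Nat) (j : Int), j + k = n → 0 ≤ j →
      ∀ (stA : solveAState) (stB : List Int × Int × List Int), solveInv j stA stB →
        solveInv n ((PySem.List.pyRange j n 1).foldl (solveStep s) stA)
          ((PySem.List.pyRange j n 1).foldl
            (fun (st : List Int × Int × List Int) (i : Int) =>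
              if (PySem.Str.pyGet? s i).getD ' ' = 'L' then (st.1, i + 1, st.2.2 ++ [st.2.1])
              else (st.1 ++ [st.2.1], i + 1, st.2.2)) stB) := by
  intro k
  induction k with
  | zero =>
    intro j hjk hj stA stB hInv
    have hje : j = n := by omega
    subst hje
    rw [PySem.List.pyRange_one_eq_nil (le_refl j)]
    simpa using hInv
  | succ k ih =>
    intro j hjk hj stA stB hInv
    have hjn : j < n := by omega
    rw [PySem.List.pyRange_one_cons hjn]
    simp only [List.foldl_cons]
    -- the character s[j] exists under Pre_
    have hjlen : j.toNat < s.toList.length := by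
      rw [PySem.Str.len_eq] at hs
      omega
    have hcast : j = ((j.toNat : Nat) : Int) := by omega
    obtain ⟨c, hc⟩ : ∃ c, PySem.Str.pyGet? s j = some c := by
      refine ⟨s.toList[j.toNat], ?_⟩
      have hcst := PySem.Str.pyGet?_natCast s j.toNat
      rw [← hcast] at hcst
      rw [hcst]
      exact List.getElem?_eq_getElem hjlen
    have hstep := solveInv_step s j c stA stB hInv hj hc
    have hB : (if (PySem.Str.pyGet? s j).getD ' ' = 'L'
          then (stB.1, j + 1, stB.2.2 ++ [stB.2.1])
          else (stB.1 ++ [stB.2.1], j + 1, stB.2.2))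
        = (if c = 'L' then (stB.1, j + 1, stB.2.2 ++ [stB.2.1])
           else (stB.1 ++ [stB.2.1], j + 1, stB.2.2)) := by
      rw [hc, Option.getD_some]
    exact ih (j + 1) (by omega) (by omega) _ _ (hB ▸ hstep)

-- the sequence the invariant maintains is short: distinct integers in [0, j]
theorem solveInv_len (j : Int) (stA : solveAState) (stB : List Int × Int × List Int)
    (hInv : solveInv j stA stB) (_hj : 0 ≤ j) :
    (stB.1 ++ stB.2.1 :: stB.2.2.reverse).length ≤ (j + 1).toNat := by
  obtain ⟨hnd, hbd, -⟩ := hInv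
  have hcard : (stB.1 ++ stB.2.1 :: stB.2.2.reverse).toFinset.card
      = (stB.1 ++ stB.2.1 :: stB.2.2.reverse).length := List.toFinset_card_of_nodup hnd
  have hsub : (stB.1 ++ stB.2.1 :: stB.2.2.reverse).toFinset ⊆ Finset.Icc (0 : Int) j := by
    intro x hx
    rw [List.mem_toFinset] at hx
    have := hbd x hx
    rw [Finset.mem_Icc]
    omega
  have := Finset.card_le_card hsub
  rw [hcard, Int.card_Icc] at this
  omega

-- reading the final heap back: the traversal, minus the tail sentinel, is B's list
theorem solve_extract (j : Int) (stA : solveAState) (stB : List Int × Int × List Int)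
    (hInv : solveInv j stA stB) (hj : 0 ≤ j) (fuel : Nat)
    (hf : (stB.1 ++ stB.2.1 :: stB.2.2.reverse).length + 1 < fuel) :
    PySem.List.slice (solveTrav stA.2.1 stA.2.2.1 fuel (-2)) none (some (-1))
      = stB.1 ++ [stB.2.1] ++ stB.2.2.reverse := by
  obtain ⟨hnd, hbd, -, -, hR, hD⟩ := hInv
  have hchain : ((-2 : Int) :: (stB.1 ++ stB.2.1 :: stB.2.2.reverse) ++ [-1])
      = [] ++ (-2 : Int) :: ((stB.1 ++ stB.2.1 :: stB.2.2.reverse) ++ [-1]) := by simp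
  have hnd2 : (([] : List Int) ++ (-2 : Int) :: ((stB.1 ++ stB.2.1 :: stB.2.2.reverse) ++ [-1])).Nodup := by
    simp only [List.nil_append, List.nodup_cons]
    constructor
    · intro h
      rcases List.mem_append.mp h with h | h
      · have := hbd _ h; omega
      · simp only [List.mem_singleton] at h; omega
    · refine List.Nodup.append hnd (List.nodup_singleton _) ?_
      intro a ha hb
      simp only [List.mem_singleton] at hb
      subst hb
      have := hbd _ ha
      omega
  have htrav := solveTrav_chain stA.2.2.1 ((stB.1 ++ stB.2.1 :: stB.2.2.reverse) ++ [-1])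
      [] (-2) fuel hnd2 (by simp only [List.length_append, List.length_cons]; simp at hf ⊢; omega)
  rw [hR, hchain, htrav, hD]
  rw [List.map_append]
  have hmap : (stB.1 ++ stB.2.1 :: stB.2.2.reverse).map
      (fun x => if 0 ≤ x ∧ x ≤ j then x else -1) = stB.1 ++ stB.2.1 :: stB.2.2.reverse := by
    rw [List.map_congr_left (g := id) (fun a ha => by
      have := hbd a ha
      simp only [id]
      rw [if_pos this]), List.map_id]
  rw [hmap]
  show PySem.List.slice ((stB.1 ++ stB.2.1 :: stB.2.2.reverse) ++ [-1]) none (some (-1)) = _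
  rw [PySem.List.slice_to_neg_one, List.dropLast_concat]
  simp

-- ===== VERDICT (by name: the statement is the Claim_ definition above) =====
theorem solve_spec : Claim_equal_solve := by
  intro n s _hdom hpre
  show solve n s = solve_alt n s
  simp only [solve, solve_alt]
  by_cases hn : 0 ≤ n
  · have hfin := solveInv_fold n s hpre n.toNat 0 (by omega) (by omega) _ _ solveInv_init
    have hlen := solveInv_len n _ _ hfin hn
    exact solve_extract n _ _ hfin hn (n.toNat + 4) (by omega)
  · rw [PySem.List.pyRange_one_eq_nil (by omega : n ≤ 0)]
    simp only [List.foldl_nil]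
    have hlen : (([] : List Int) ++ (0 : Int) :: ([] : List Int).reverse).length + 1 < n.toNat + 4 := by
      simp
    exact solve_extract 0 _ _ solveInv_init (le_refl 0) (n.toNat + 4) hlen
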